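-- pv_equiv track=rewrite | github.com/OranPie/Ferrython | stdlib/Lib/getopt.py | long_has_args
-- ===== SOURCE A (Python) =====
-- class GetoptError(Exception):
--     """Exception raised on getopt errors."""
--     def __init__(self, msg, opt=''):
--         self.msg = msg
--         self.opt = opt
--         super().__init__(msg)
--
--     def __str__(self):
--         return self.msg
--
-- def long_has_args(opt, longopts):
--     """Check if a long option requires an argument. Returns (has_arg, option)."""
--     possibilities = [o for o in longopts if o == opt or o == opt + '=' or o.startswith(opt) or o.startswith(opt + '=')]
--     if not possibilities:
--         raise GetoptError('option --%s not recognized' % opt, opt)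
--     # Exact match takes priority
--     if opt in possibilities:
--         return False, opt
--     if opt + '=' in possibilities:
--         return True, opt
--     # Prefix match — must be unique
--     if len(possibilities) > 1:
--         raise GetoptError('option --%s not a unique prefix' % opt, opt)
--     match = possibilities[0]
--     if match.endswith('='):
--         return True, match[:-1]
--     return False, match
-- ===== SOURCE B (Python) =====
-- class GetoptError(Exception):
--     """Exception raised on getopt errors."""
--     def __init__(self, msg, opt=''):
--         self.msg = msg
--         self.opt = opt
--         super().__init__(msg)
--
--     def __str__(self):
--         return self.msg
--
-- def bisect_left_str(a, x):
--     """First index at which x could be inserted keeping a sorted."""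
--     lo, hi = 0, len(a)
--     while lo < hi:
--         mid = (lo + hi) // 2
--         if a[mid] < x:
--             lo = mid + 1
--         else:
--             hi = mid
--     return lo
--
-- def long_has_args(opt, longopts):
--     """Check if a long option requires an argument. Returns (has_arg, option)."""
--     # Sort once: the options starting with opt form a contiguous block [lo, hi).
--     srt = sorted(longopts)
--     n = len(srt)
--     lo = bisect_left_str(srt, opt)
--     hi = lo
--     while hi < n and srt[hi].startswith(opt):
--         hi += 1
--     if lo == hi:
--         raise GetoptError('option --%s not recognized' % opt, opt)
--     # An exact match, if any, is the smallest element of the block.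
--     if srt[lo] == opt:
--         return False, opt
--     eq = opt + '='
--     i = bisect_left_str(srt, eq)
--     if i < n and srt[i] == eq:
--         return True, opt
--     if hi - lo > 1:
--         raise GetoptError('option --%s not a unique prefix' % opt, opt)
--     match = srt[lo]
--     if match.endswith('='):
--         return True, match[:-1]
--     return False, match
-- ===== Notes on version B (the rewrite author's own statement) =====
-- stated objective: alternative
-- what changed: Replaced A's build-candidate-list-plus-membership/length scans by sorting longopts once and running a hand-written binary search: prefix matches form a contiguous block [lo,hi) in the sorted list (lo from bisect_left, hi by extending the block), the exact match can only be the block's first element, and opt+'=' is found by a second binary search.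
import Mathlib
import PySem

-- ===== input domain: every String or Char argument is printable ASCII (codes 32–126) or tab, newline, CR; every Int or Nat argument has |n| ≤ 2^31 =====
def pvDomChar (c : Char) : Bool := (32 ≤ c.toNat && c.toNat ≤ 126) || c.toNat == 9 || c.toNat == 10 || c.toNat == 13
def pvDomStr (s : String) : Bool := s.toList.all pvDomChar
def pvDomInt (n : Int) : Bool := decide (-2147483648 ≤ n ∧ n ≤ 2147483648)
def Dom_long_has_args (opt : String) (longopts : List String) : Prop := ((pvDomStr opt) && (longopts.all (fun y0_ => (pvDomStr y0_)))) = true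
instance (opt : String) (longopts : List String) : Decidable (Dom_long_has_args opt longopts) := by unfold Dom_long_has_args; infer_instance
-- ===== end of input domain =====

-- B replaces A's candidate-list construction plus membership/length scans by sorting longopts once
-- and binary-searching the contiguous block of prefix matches (objective: alternative algorithm);
-- GetoptError raises are outside Pre_.


-- ===== PORT A =====
-- 'raise GetoptError(...)' branches return (false, "") ; exactly those inputs are excluded by Pre_.
def long_has_args (opt : String) (longopts : List String) : Bool × String :=
  let possibilities := longopts.filter (fun o =>
    o == opt || o == opt ++ "=" || PySem.Str.startswith o opt || PySem.Str.startswith o (opt ++ "="))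
  if possibilities.isEmpty then (false, "")      -- raise GetoptError('option --%s not recognized')
  else if opt ∈ possibilities then (false, opt)
  else if (opt ++ "=") ∈ possibilities then (true, opt)
  else if possibilities.length > 1 then (false, "")   -- raise GetoptError('option --%s not a unique prefix')
  else
    let m := PySem.List.pyGetD possibilities 0 ""
    if PySem.Str.endswith m "=" then (true, PySem.Str.slice m none (some (-1)))
    else (false, m)

-- ===== PORT B =====
-- Source B's bisect_left_str: lo and hi stay in [0, len a], so Nat and Nat-division are exact for
-- Python's nonnegative ints and '(lo+hi)//2' here.
def bisectLeftStr (a : List String) (x : String) (lo hi : Nat) : Nat :=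
  if lo < hi then
    if PySem.List.pyGetD a (((lo + hi) / 2 : Nat) : Int) "" < x then
      bisectLeftStr a x ((lo + hi) / 2 + 1) hi
    else bisectLeftStr a x lo ((lo + hi) / 2)
  else lo
termination_by hi - lo
decreasing_by all_goals omega

-- Source B's 'while hi < n and srt[hi].startswith(opt): hi += 1'
def scanHi (srt : List String) (opt : String) (hi : Nat) : Nat :=
  if hi < srt.length then
    if PySem.Str.startswith (PySem.List.pyGetD srt (hi : Int) "") opt then scanHi srt opt (hi + 1)
    else hi
  else hi
termination_by srt.length - hi
decreasing_by omega

def long_has_args_alt (opt : String) (longopts : List String) : Bool × String :=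
  let srt := PySem.List.sorted longopts (fun x => x) false
  let n := srt.length
  let lo := bisectLeftStr srt opt 0 n
  let hi := scanHi srt opt lo
  if lo == hi then (false, "")                   -- raise GetoptError('option --%s not recognized')
  else if PySem.List.pyGetD srt (lo : Int) "" == opt then (false, opt)
  else
    let eqs := opt ++ "="
    let i := bisectLeftStr srt eqs 0 n
    if i < n ∧ PySem.List.pyGetD srt (i : Int) "" == eqs then (true, opt)
    else if hi - lo > 1 then (false, "")         -- raise GetoptError('option --%s not a unique prefix')
    else
      let m := PySem.List.pyGetD srt (lo : Int) ""
      if PySem.Str.endswith m "=" then (true, PySem.Str.slice m none (some (-1)))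
      else (false, m)

-- ===== PRECONDITION & SPEC =====
-- Pre_ excludes exactly the inputs on which A raises GetoptError: no longopt equals opt or
-- opt+'=' and the number of longopts starting with opt is not exactly one.
def Pre_long_has_args (opt : String) (longopts : List String) : Prop :=
  opt ∈ longopts ∨ (opt ++ "=") ∈ longopts ∨
    (longopts.countP (fun o => PySem.Str.startswith o opt)) = 1
instance (opt : String) (longopts : List String) : Decidable (Pre_long_has_args opt longopts) := by
  unfold Pre_long_has_args; infer_instance
def pvWitness_long_has_args : String × List String := ("fo", ["foo=", "bar"])

def Spec_long_has_args (opt : String) (longopts : List String) (out : Bool × String) : Prop := out = long_has_args_alt opt longopts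
instance (opt : String) (longopts : List String) (out : Bool × String) : Decidable (Spec_long_has_args opt longopts out) := by unfold Spec_long_has_args; infer_instance

-- ===== CLAIM (what is proved, stated in full; the proofs are below) =====
def Claim_equal_long_has_args : Prop := ∀ (opt : String) (longopts : List String), Dom_long_has_args opt longopts → Pre_long_has_args opt longopts → Spec_long_has_args opt longopts (long_has_args opt longopts)

-- ===== LEMMAS AND PROOFS =====

-- startswith is reflexive
lemma sw_refl (s : String) : PySem.Str.startswith s s = true := by
  simp [PySem.Chars.startswith_iff]

-- opt++'=' starts with opt
lemma sw_eq (opt : String) : PySem.Str.startswith (opt ++ "=") opt = true := by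
  simp [PySem.Chars.startswith_iff]

-- startswith (opt++'=') implies startswith opt
lemma sw_trans (o opt : String) (h : PySem.Str.startswith o (opt ++ "=") = true) :
    PySem.Str.startswith o opt = true := by
  simp only [PySem.Str.startswith_eq, PySem.Chars.startswith_iff, String.toList_append] at h ⊢
  exact (List.prefix_append _ _).trans h

lemma beq_opt_false (o opt : String) (hs : PySem.Str.startswith o opt = false) :
    (o == opt) = false := by
  refine beq_eq_false_iff_ne.mpr (fun h => ?_)
  subst h; rw [sw_refl] at hs; cases hs

lemma beq_optEq_false (o opt : String) (hs : PySem.Str.startswith o opt = false) :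
    (o == opt ++ "=") = false := by
  refine beq_eq_false_iff_ne.mpr (fun h => ?_)
  subst h; rw [sw_eq] at hs; cases hs

lemma sw_eq_false (o opt : String) (hs : PySem.Str.startswith o opt = false) :
    PySem.Str.startswith o (opt ++ "=") = false := by
  cases hv : PySem.Str.startswith o (opt ++ "=")
  · rfl
  · rw [sw_trans o opt hv] at hs; cases hs

-- A's four-way filter condition is just startswith
lemma cond_eq (opt o : String) :
    (o == opt || o == opt ++ "=" || PySem.Str.startswith o opt
      || PySem.Str.startswith o (opt ++ "=")) = PySem.Str.startswith o opt := by
  cases hs : PySem.Str.startswith o opt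
  · rw [beq_opt_false o opt hs, beq_optEq_false o opt hs, sw_eq_false o opt hs]
    simp
  · simp

-- a prefix of a list is lexicographically ≤ it
lemma pfx_le (p b : List Char) (h : p <+: b) : p ≤ b := by
  obtain ⟨r, rfl⟩ := h
  induction p with
  | nil =>
    cases r with
    | nil => simp
    | cons c cs => exact le_of_lt (List.nil_lt_cons c cs)
  | cons a as ih => exact List.cons_le_cons a ih

-- prefix convexity of the lexicographic order: anything between p and an extension of p extends p
lemma between_pfx (p : List Char) : ∀ b c : List Char, p ≤ b → b ≤ c → p <+: c → p <+: b := by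
  induction p with
  | nil => intro b c _ _ _; exact List.nil_prefix
  | cons a as ih =>
    intro b c h1 h2 hc
    obtain ⟨r, rfl⟩ := hc
    cases b with
    | nil =>
      rw [← Std.not_lt] at h1
      exact absurd (List.nil_lt_cons a as) h1
    | cons x b' =>
      rw [← Std.not_lt, List.cons_lt_cons_iff] at h1
      push Not at h1
      rcases le_iff_lt_or_eq.mp h2 with hlt | heq
      · rw [List.cons_append, List.cons_lt_cons_iff] at hlt
        rcases hlt with hxa | ⟨hxa, hb'⟩
        · exact absurd hxa (not_lt.mpr h1.1)
        · subst hxa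
          exact List.cons_prefix_cons.mpr
            ⟨rfl, ih b' (as ++ r) (h1.2 rfl) (le_of_lt hb') (List.prefix_append as r)⟩
      · rw [List.cons_append] at heq
        injection heq with e1 e2
        subst e1
        subst e2
        exact List.cons_prefix_cons.mpr ⟨rfl, List.prefix_append as r⟩

-- String versions
lemma str_pfx_le (p o : String) (h : PySem.Str.startswith o p = true) : p ≤ o := by
  rw [String.le_iff_toList_le]
  exact pfx_le _ _ (by simpa [PySem.Str.startswith_eq, PySem.Chars.startswith_iff] using h)

lemma str_between (p b c : String) (h1 : p ≤ b) (h2 : b ≤ c)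
    (hc : PySem.Str.startswith c p = true) : PySem.Str.startswith b p = true := by
  simp only [PySem.Str.startswith_eq, PySem.Chars.startswith_iff] at hc ⊢
  exact between_pfx p.toList b.toList c.toList (String.le_iff_toList_le.mp h1)
    (String.le_iff_toList_le.mp h2) hc

-- monotone access in a sorted list
lemma getD_mono (a : List String) (hsort : a.Pairwise (· ≤ ·)) (j k : Nat)
    (hjk : j ≤ k) (hk : k < a.length) : a.getD j "" ≤ a.getD k "" := by
  rcases Nat.lt_or_ge j k with h | h
  · rw [List.getD_eq_getElem a "" (lt_trans h hk), List.getD_eq_getElem a "" hk]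
    exact List.pairwise_iff_getElem.mp hsort j k _ _ h
  · have : j = k := le_antisymm hjk h
    subst this
    exact le_refl _

-- spec of Source B's hand-written lower-bound binary search (on a sorted list)
lemma bisectLeftStr_spec (a : List String) (x : String) (hsort : a.Pairwise (· ≤ ·)) :
    ∀ (lo hi : Nat), lo ≤ hi → hi ≤ a.length →
      lo ≤ bisectLeftStr a x lo hi ∧ bisectLeftStr a x lo hi ≤ hi ∧
      (∀ j, lo ≤ j → j < bisectLeftStr a x lo hi → a.getD j "" < x) ∧
      (∀ j, bisectLeftStr a x lo hi ≤ j → j < hi → x ≤ a.getD j "") := by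
  intro lo0 hi0
  induction lo0, hi0 using bisectLeftStr.induct a x with
  | case1 lo hi hlt hcmp ih =>
    intro _ hhi
    have hmid : (lo + hi) / 2 < hi := by omega
    rw [bisectLeftStr]
    rw [if_pos hlt, if_pos hcmp]
    obtain ⟨i1, i2, i3, i4⟩ := ih (by omega) hhi
    rw [PySem.List.pyGetD_natCast] at hcmp
    refine ⟨by omega, i2, ?_, i4⟩
    intro j hj1 hj2
    rcases Nat.lt_or_ge j ((lo + hi) / 2 + 1) with h | h
    · exact lt_of_le_of_lt (getD_mono a hsort j _ (by omega) (by omega)) hcmp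
    · exact i3 j h hj2
  | case2 lo hi hlt hcmp ih =>
    intro _ hhi
    have hmid : (lo + hi) / 2 < hi := by omega
    rw [bisectLeftStr]
    rw [if_pos hlt, if_neg hcmp]
    obtain ⟨i1, i2, i3, i4⟩ := ih (by omega) (by omega)
    rw [PySem.List.pyGetD_natCast, not_lt] at hcmp
    refine ⟨i1, by omega, i3, ?_⟩
    intro j hj1 hj2
    rcases Nat.lt_or_ge j ((lo + hi) / 2) with h | h
    · exact i4 j hj1 h
    · exact le_trans hcmp (getD_mono a hsort _ j h (by omega))
  | case3 lo hi hnlt =>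
    intro hle _
    rw [bisectLeftStr, if_neg hnlt]
    exact ⟨le_refl _, hle, fun j h1 h2 => by omega, fun j h1 h2 => by omega⟩

-- spec of Source B's block-extension loop
lemma scanHi_spec (srt : List String) (opt : String) :
    ∀ (h0 : Nat), h0 ≤ srt.length →
      h0 ≤ scanHi srt opt h0 ∧ scanHi srt opt h0 ≤ srt.length ∧
      (∀ j, h0 ≤ j → j < scanHi srt opt h0 → PySem.Str.startswith (srt.getD j "") opt = true) ∧
      (scanHi srt opt h0 < srt.length →
        PySem.Str.startswith (srt.getD (scanHi srt opt h0) "") opt = false) := by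
  intro h0
  induction h0 using scanHi.induct srt opt with
  | case1 hi hlt hsw ih =>
    intro _
    rw [scanHi]
    rw [if_pos hlt, if_pos hsw]
    obtain ⟨i1, i2, i3, i4⟩ := ih (by omega)
    rw [PySem.List.pyGetD_natCast] at hsw
    refine ⟨by omega, i2, ?_, i4⟩
    intro j hj1 hj2
    rcases Nat.lt_or_ge j (hi + 1) with h | h
    · have : j = hi := by omega
      subst this
      exact hsw
    · exact i3 j h hj2
  | case2 hi hlt hsw =>
    intro _
    rw [scanHi]
    rw [if_pos hlt, if_neg hsw]
    rw [PySem.List.pyGetD_natCast] at hsw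
    exact ⟨le_refl _, by omega, fun j h1 h2 => by omega,
      fun _ => Bool.not_eq_true _ ▸ (by simpa using hsw)⟩
  | case3 hi hnlt =>
    intro hle
    rw [scanHi, if_neg hnlt]
    exact ⟨le_refl _, hle, fun j h1 h2 => by omega, fun h => absurd h hnlt⟩

-- a filter whose truth set is exactly the index interval [lo, hi) is the middle slice
lemma filter_eq_mid {α : Type} (l : List α) (P : α → Bool) (lo hi : Nat)
    (hlh : lo ≤ hi) (hhn : hi ≤ l.length)
    (hchar : ∀ j (hj : j < l.length), P l[j] = true ↔ lo ≤ j ∧ j < hi) :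
    l.filter P = (l.drop lo).take (hi - lo) := by
  have hdec : l = l.take lo ++ ((l.drop lo).take (hi - lo) ++ (l.drop lo).drop (hi - lo)) := by
    rw [List.take_append_drop, List.take_append_drop]
  conv_lhs => rw [hdec]
  rw [List.filter_append, List.filter_append]
  have hpre : (l.take lo).filter P = [] := by
    rw [List.filter_eq_nil_iff]
    intro x hx
    obtain ⟨j, hj, rfl⟩ := List.mem_take_iff_getElem.mp hx
    intro hP
    have := (hchar j (by omega)).mp hP
    omega
  have hmid : ((l.drop lo).take (hi - lo)).filter P = (l.drop lo).take (hi - lo) := by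
    rw [List.filter_eq_self]
    intro x hx
    obtain ⟨i, hi', rfl⟩ := List.mem_take_iff_getElem.mp hx
    rw [List.getElem_drop]
    have hlen : (l.drop lo).length = l.length - lo := List.length_drop
    exact (hchar (lo + i) (by omega)).mpr ⟨by omega, by omega⟩
  have hsuf : ((l.drop lo).drop (hi - lo)).filter P = [] := by
    rw [List.drop_drop, List.filter_eq_nil_iff]
    intro x hx
    obtain ⟨i, hi', rfl⟩ := List.mem_iff_getElem.mp hx
    rw [List.getElem_drop]
    intro hP
    have hlen : (l.drop (lo + (hi - lo))).length = l.length - (lo + (hi - lo)) := List.length_drop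
    have := (hchar (lo + (hi - lo) + i) (by omega)).mp hP
    omega
  rw [hpre, hmid, hsuf, List.nil_append, List.append_nil]

-- main correspondence, with everything named
theorem long_has_args_spec : Claim_equal_long_has_args := by
  intro opt longopts _ _
  simp only [Spec_long_has_args, long_has_args, long_has_args_alt]
  set P : String → Bool := fun o => PySem.Str.startswith o opt with hP
  set srt := PySem.List.sorted longopts (fun x => x) false with hsrt
  set n := srt.length with hn
  set lo := bisectLeftStr srt opt 0 n with hlo
  set hi := scanHi srt opt lo with hhi
  set eqs := opt ++ "=" with heqs
  set i := bisectLeftStr srt eqs 0 n with hiDef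
  have hsort : srt.Pairwise (fun a b => a ≤ b) := PySem.List.sorted_pairwise longopts (fun x => x)
  obtain ⟨hlo0, hlon, hblo, hbgt⟩ :=
    bisectLeftStr_spec srt opt hsort 0 n (Nat.zero_le _) (le_refl _)
  obtain ⟨hhl, hhn, hsw_in, hsw_out⟩ := scanHi_spec srt opt lo hlon
  obtain ⟨hi0', hiN, hblo2, hbgt2⟩ :=
    bisectLeftStr_spec srt eqs hsort 0 n (Nat.zero_le _) (le_refl _)
  have hchar : ∀ j (hj : j < srt.length), (P srt[j] = true ↔ lo ≤ j ∧ j < hi) := by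
    intro j hj
    constructor
    · intro hPj
      have hle : opt ≤ srt[j] := str_pfx_le _ _ hPj
      constructor
      · by_contra h
        push Not at h
        have hlt := hblo j (Nat.zero_le _) h
        rw [List.getD_eq_getElem srt "" hj] at hlt
        exact absurd hle (not_le.mpr hlt)
      · by_contra h
        push Not at h
        have hhilt : hi < srt.length := lt_of_le_of_lt h hj
        have hout := hsw_out hhilt
        have h1 : opt ≤ srt.getD hi "" := hbgt hi hhl hhilt
        have h2 : srt.getD hi "" ≤ srt[j] := by
          rw [← List.getD_eq_getElem srt "" hj]
          exact getD_mono srt hsort hi j h hj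
        have := str_between opt (srt.getD hi "") srt[j] h1 h2 hPj
        rw [this] at hout
        cases hout
    · rintro ⟨h1, h2⟩
      have := hsw_in j h1 h2
      rw [List.getD_eq_getElem srt "" hj] at this
      exact this
  have hmid : srt.filter P = (srt.drop lo).take (hi - lo) :=
    filter_eq_mid srt P lo hi hhl hhn hchar
  have hposs : longopts.filter (fun o =>
      o == opt || o == opt ++ "=" || PySem.Str.startswith o opt
        || PySem.Str.startswith o (opt ++ "=")) = longopts.filter P :=
    List.filter_congr (fun o _ => cond_eq opt o)
  have hperm : (srt.filter P).Perm (longopts.filter P) :=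
    (PySem.List.sorted_perm longopts (fun x => x) false).filter P
  have hlenposs : (longopts.filter P).length = hi - lo := by
    rw [← hperm.length_eq, hmid, List.length_take, List.length_drop]
    omega
  rw [hposs]
  by_cases hempty : lo = hi
  · have hE : (longopts.filter P).isEmpty = true := by
      rw [List.isEmpty_iff_length_eq_zero, hlenposs]
      omega
    rw [if_pos hE, if_pos (by simpa using hempty : (lo == hi) = true)]
  · have hlthi : lo < hi := lt_of_le_of_ne hhl hempty
    have hE : ¬ (longopts.filter P).isEmpty = true := by
      rw [List.isEmpty_iff_length_eq_zero, hlenposs]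
      omega
    rw [if_neg hE, if_neg (by simpa using hempty : ¬ (lo == hi) = true)]
    have hlon' : lo < srt.length := lt_of_lt_of_le hlthi hhn
    have hgetlo : PySem.List.pyGetD srt (lo : Int) "" = srt[lo] := by
      rw [PySem.List.pyGetD_natCast, List.getD_eq_getElem srt "" hlon']
    have hexact_iff : opt ∈ longopts.filter P ↔ srt[lo] = opt := by
      constructor
      · intro hmem
        have hmemS : opt ∈ srt.filter P := hperm.mem_iff.mpr hmem
        rw [hmid] at hmemS
        obtain ⟨i2, hi2, he⟩ := List.mem_take_iff_getElem.mp hmemS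
        rw [List.getElem_drop] at he
        have hlend : (srt.drop lo).length = srt.length - lo := List.length_drop
        have hup : opt ≤ srt.getD lo "" := hbgt lo (le_refl _) hlon'
        have hdown : srt.getD lo "" ≤ opt := by
          rw [← he, ← List.getD_eq_getElem srt ""]
          exact getD_mono srt hsort lo (lo + i2) (by omega) (by omega)
        rw [← List.getD_eq_getElem srt "" hlon']
        exact le_antisymm hdown hup
      · intro hex
        have hmemS : opt ∈ srt := List.mem_iff_getElem.mpr ⟨lo, hlon', hex⟩
        have : opt ∈ longopts :=
          ((PySem.List.sorted_perm longopts (fun x => x) false).subset) hmemS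
        exact List.mem_filter.mpr ⟨this, sw_refl opt⟩
    by_cases hex : srt[lo] = opt
    · rw [if_pos (hexact_iff.mpr hex),
        if_pos (by rw [hgetlo]; simpa using hex : (PySem.List.pyGetD srt (↑lo) "" == opt) = true)]
    · rw [if_neg (fun h => hex (hexact_iff.mp h)),
        if_neg (by rw [hgetlo]; simpa using hex : ¬ (PySem.List.pyGetD srt (↑lo) "" == opt) = true)]
      have heq_iff : eqs ∈ longopts.filter P ↔ (i < n ∧ srt.getD i "" = eqs) := by
        constructor
        · intro hmem
          have hmemS : eqs ∈ srt := (List.mem_filter.mp (hperm.mem_iff.mpr hmem)).1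
          obtain ⟨j, hj, hje⟩ := List.mem_iff_getElem.mp hmemS
          have hij : i ≤ j := by
            by_contra h
            push Not at h
            have := hblo2 j (Nat.zero_le _) h
            rw [List.getD_eq_getElem srt "" hj, hje] at this
            exact lt_irrefl _ this
          have hin : i < n := lt_of_le_of_lt hij hj
          refine ⟨hin, le_antisymm ?_ (hbgt2 i (le_refl _) hin)⟩
          rw [← hje, ← List.getD_eq_getElem srt "" hj]
          exact getD_mono srt hsort i j hij hj
        · rintro ⟨hin, hie⟩
          have hmemS : eqs ∈ srt := by
            refine List.mem_iff_getElem.mpr ⟨i, hin, ?_⟩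
            rw [← List.getD_eq_getElem srt "" hin]
            exact hie
          have : eqs ∈ longopts :=
            ((PySem.List.sorted_perm longopts (fun x => x) false).subset) hmemS
          exact List.mem_filter.mpr ⟨this, sw_eq opt⟩
      by_cases hEq : i < n ∧ srt.getD i "" = eqs
      · rw [if_pos (heq_iff.mpr hEq),
          if_pos (show i < n ∧ (PySem.List.pyGetD srt (↑i) "" == eqs) = true by
            refine ⟨hEq.1, ?_⟩
            rw [PySem.List.pyGetD_natCast]
            simpa using hEq.2)]
      · rw [if_neg (fun h => hEq (heq_iff.mp h)),
          if_neg (show ¬ (i < n ∧ (PySem.List.pyGetD srt (↑i) "" == eqs) = true) by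
            intro h
            exact hEq ⟨h.1, by rw [PySem.List.pyGetD_natCast] at h; simpa using h.2⟩)]
        by_cases hamb : hi - lo > 1
        · rw [if_pos (by omega : (longopts.filter P).length > 1), if_pos hamb]
        · rw [if_neg (by omega : ¬ (longopts.filter P).length > 1), if_neg hamb]
          have hone : hi - lo = 1 := by omega
          have hsingle : longopts.filter P = [srt[lo]] := by
            apply List.perm_singleton.mp
            refine hperm.symm.trans ?_
            rw [hmid, hone, List.drop_eq_getElem_cons hlon', List.take_succ_cons, List.take_zero]
          rw [hsingle]
          have hget0 : PySem.List.pyGetD [srt[lo]] 0 "" = srt[lo] := rfl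
          rw [hget0, hgetlo]
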